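-- pv_equiv track=rewrite | github.com/Knowledge-Graph-Hub/kg-microbe | kg_microbe/transform_utils/bakta/utils.py | parse_dbxrefs
-- ===== SOURCE A (Python) =====
-- from typing import Dict, List, Optional, Set, Tuple
--
-- def parse_dbxrefs(dbxref_string: str) -> Dict[str, List[str]]:
--     """
--     Parse the DbXrefs column from Bakta TSV into structured annotations.
--
--     :param dbxref_string: Comma-separated string of database cross-references
--     :return: Dictionary with annotation types as keys and lists of IDs as values
--     """
--     annotations = {
--         "go": [],
--         "ec": [],
--         "uniref": [],
--         "refseq": [],
--         "cog": [],
--         "kegg": [],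
--         "uniparc": [],
--         "rfam": [],
--         "so": [],
--     }
--
--     if not dbxref_string or dbxref_string.strip() == "":
--         return annotations
--
--     # Split by comma and process each item
--     for item in dbxref_string.split(","):
--         item = item.strip()
--
--         # GO terms
--         if item.startswith("GO:"):
--             annotations["go"].append(item)
--         # EC numbers
--         elif item.startswith("EC:"):
--             annotations["ec"].append(item)
--         # UniRef (all three levels: 100/90/50)
--         elif item.startswith("UniRef:"):
--             # Extract just the ID (e.g., UniRef50_Q8EUL1)
--             annotations["uniref"].append(item.replace("UniRef:", ""))
--         # RefSeq
--         elif item.startswith("RefSeq:"):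
--             annotations["refseq"].append(item.replace("RefSeq:", ""))
--         # COG (only COG:COGXXXX, not COG:X letter codes)
--         elif item.startswith("COG:COG"):
--             annotations["cog"].append(item)
--         # KEGG
--         elif item.startswith("KEGG:"):
--             annotations["kegg"].append(item)
--         # UniParc
--         elif item.startswith("UniParc:"):
--             annotations["uniparc"].append(item.replace("UniParc:", ""))
--         # RFAM
--         elif item.startswith("RFAM:"):
--             annotations["rfam"].append(item)
--         # SO (Sequence Ontology)
--         elif item.startswith("SO:"):
--             annotations["so"].append(item)
--
--     return annotations
-- ===== SOURCE B (Python) =====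
-- def parse_dbxrefs(dbxref_string):
--     """Same result as A: per-key grouping over a prefix table instead of a per-item elif chain."""
--     table = [
--         ("go", "GO:", False),
--         ("ec", "EC:", False),
--         ("uniref", "UniRef:", True),
--         ("refseq", "RefSeq:", True),
--         ("cog", "COG:COG", False),
--         ("kegg", "KEGG:", False),
--         ("uniparc", "UniParc:", True),
--         ("rfam", "RFAM:", False),
--         ("so", "SO:", False),
--     ]
--     if not dbxref_string or dbxref_string.strip() == "":
--         items = []
--     else:
--         items = [x.strip() for x in dbxref_string.split(",")]
--     return {
--         key: [(it.replace(pre, "") if strip else it) for it in items if it.startswith(pre)]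
--         for key, pre, strip in table
--     }
-- ===== Notes on version B (the rewrite author's own statement) =====
-- stated objective: idiomatic
-- what changed: Replaces A's per-item if/elif dispatch appending into a pre-built dict by a per-key grouping: a prefix table and, for each of the nine keys, one filter+map comprehension over the comma-split stripped items (valid because the nine prefixes are pairwise non-overlapping).
import Mathlib
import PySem

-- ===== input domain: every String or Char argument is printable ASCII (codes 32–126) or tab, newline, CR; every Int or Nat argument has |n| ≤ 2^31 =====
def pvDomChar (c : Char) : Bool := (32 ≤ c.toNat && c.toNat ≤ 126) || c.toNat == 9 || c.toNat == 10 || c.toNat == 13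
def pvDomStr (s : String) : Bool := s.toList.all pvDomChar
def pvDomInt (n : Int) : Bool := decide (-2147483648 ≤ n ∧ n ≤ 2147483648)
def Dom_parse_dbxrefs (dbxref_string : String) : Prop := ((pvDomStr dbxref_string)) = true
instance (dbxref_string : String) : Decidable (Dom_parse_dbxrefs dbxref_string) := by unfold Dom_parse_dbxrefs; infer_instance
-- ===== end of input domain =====

-- B replaces A's per-item if/elif dispatch by a per-key pass: one prefix table and, for each key,
-- a filter+map over the split items (idiomatic grouping; same cost, same exact output).

-- ===== PORT A =====
def parse_dbxrefs (dbxref_string : String) : List (String × List String) :=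
  let annotations : PySem.Dict String (List String) :=
    PySem.Dict.ofList [("go", []), ("ec", []), ("uniref", []), ("refseq", []), ("cog", []),
                       ("kegg", []), ("uniparc", []), ("rfam", []), ("so", [])]
  if dbxref_string = "" ∨ PySem.Str.strip dbxref_string = "" then annotations.items
  else
    (((PySem.Str.split? dbxref_string ",").getD []).foldl (fun d item0 =>
      let item := PySem.Str.strip item0
      if PySem.Str.startswith item "GO:" then d.modify "go" [] (· ++ [item])
      else if PySem.Str.startswith item "EC:" then d.modify "ec" [] (· ++ [item])
      else if PySem.Str.startswith item "UniRef:" then d.modify "uniref" [] (· ++ [PySem.Str.replace item "UniRef:" ""])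
      else if PySem.Str.startswith item "RefSeq:" then d.modify "refseq" [] (· ++ [PySem.Str.replace item "RefSeq:" ""])
      else if PySem.Str.startswith item "COG:COG" then d.modify "cog" [] (· ++ [item])
      else if PySem.Str.startswith item "KEGG:" then d.modify "kegg" [] (· ++ [item])
      else if PySem.Str.startswith item "UniParc:" then d.modify "uniparc" [] (· ++ [PySem.Str.replace item "UniParc:" ""])
      else if PySem.Str.startswith item "RFAM:" then d.modify "rfam" [] (· ++ [item])
      else if PySem.Str.startswith item "SO:" then d.modify "so" [] (· ++ [item])
      else d) annotations).items

-- ===== PORT B =====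
def pvTable : List (String × String × Bool) :=
  [("go", "GO:", false), ("ec", "EC:", false), ("uniref", "UniRef:", true),
   ("refseq", "RefSeq:", true), ("cog", "COG:COG", false), ("kegg", "KEGG:", false),
   ("uniparc", "UniParc:", true), ("rfam", "RFAM:", false), ("so", "SO:", false)]

def parse_dbxrefs_alt (dbxref_string : String) : List (String × List String) :=
  let items : List String :=
    if dbxref_string = "" ∨ PySem.Str.strip dbxref_string = "" then []
    else ((PySem.Str.split? dbxref_string ",").getD []).map PySem.Str.strip
  pvTable.map (fun kps =>
    (kps.1, (items.filter (fun it => PySem.Str.startswith it kps.2.1)).map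
              (fun it => if kps.2.2 then PySem.Str.replace it kps.2.1 "" else it)))

-- ===== PRECONDITION & SPEC =====
def Spec_parse_dbxrefs (dbxref_string : String) (out : List (String × List String)) : Prop := out = parse_dbxrefs_alt dbxref_string
instance (dbxref_string : String) (out : List (String × List String)) : Decidable (Spec_parse_dbxrefs dbxref_string out) := by unfold Spec_parse_dbxrefs; infer_instance

-- ===== CLAIM (what is proved, stated in full; the proofs are below) =====
def Claim_equal_parse_dbxrefs : Prop := ∀ (dbxref_string : String), Dom_parse_dbxrefs dbxref_string → Spec_parse_dbxrefs dbxref_string (parse_dbxrefs dbxref_string)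

-- ===== LEMMAS AND PROOFS =====

-- the per-item dispatch of A, on an already-stripped item
def pvStep (d : PySem.Dict String (List String)) (item : String) : PySem.Dict String (List String) :=
  if PySem.Str.startswith item "GO:" then d.modify "go" [] (· ++ [item])
  else if PySem.Str.startswith item "EC:" then d.modify "ec" [] (· ++ [item])
  else if PySem.Str.startswith item "UniRef:" then d.modify "uniref" [] (· ++ [PySem.Str.replace item "UniRef:" ""])
  else if PySem.Str.startswith item "RefSeq:" then d.modify "refseq" [] (· ++ [PySem.Str.replace item "RefSeq:" ""])
  else if PySem.Str.startswith item "COG:COG" then d.modify "cog" [] (· ++ [item])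
  else if PySem.Str.startswith item "KEGG:" then d.modify "kegg" [] (· ++ [item])
  else if PySem.Str.startswith item "UniParc:" then d.modify "uniparc" [] (· ++ [PySem.Str.replace item "UniParc:" ""])
  else if PySem.Str.startswith item "RFAM:" then d.modify "rfam" [] (· ++ [item])
  else if PySem.Str.startswith item "SO:" then d.modify "so" [] (· ++ [item])
  else d

-- B's per-key selection
def pvSel (p : String) (st : Bool) (L : List String) : List String :=
  (L.filter (fun it => PySem.Str.startswith it p)).map
    (fun it => if st then PySem.Str.replace it p "" else it)

theorem pvSel_cons_pos (p : String) (st : Bool) (x : String) (L : List String)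
    (h : PySem.Str.startswith x p = true) :
    pvSel p st (x :: L) = (if st then PySem.Str.replace x p "" else x) :: pvSel p st L := by
  simp only [pvSel, List.filter_cons, h, if_true, List.map_cons]

theorem pvSel_cons_neg (p : String) (st : Bool) (x : String) (L : List String)
    (h : PySem.Str.startswith x p = false) :
    pvSel p st (x :: L) = pvSel p st L := by
  simp only [pvSel, List.filter_cons, h, Bool.false_eq_true, if_false]

-- a string cannot start with two <+:-incomparable prefixes
theorem pvSwExcl (x p q : String) (h : PySem.Str.startswith x p = true)
    (hpq : (decide (p.toList <+: q.toList) || decide (q.toList <+: p.toList)) = false) :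
    PySem.Str.startswith x q = false := by
  simp only [Bool.or_eq_false_iff, decide_eq_false_iff_not] at hpq
  simp only [PySem.Str.startswith_eq] at h ⊢
  by_contra hq
  simp only [Bool.not_eq_false] at hq
  rw [PySem.Chars.startswith_iff] at h hq
  rcases List.prefix_or_prefix_of_prefix h hq with hc | hc
  · exact hpq.1 hc
  · exact hpq.2 hc

-- the loop of A, characterised entry-wise by B's selections
theorem pvLoop (L : List String) (g e u r c k2 up rf so : List String) :
    (L.foldl pvStep (PySem.Dict.mk
      [("go", g), ("ec", e), ("uniref", u), ("refseq", r), ("cog", c),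
       ("kegg", k2), ("uniparc", up), ("rfam", rf), ("so", so)])).items
    = [("go", g ++ pvSel "GO:" false L), ("ec", e ++ pvSel "EC:" false L),
       ("uniref", u ++ pvSel "UniRef:" true L), ("refseq", r ++ pvSel "RefSeq:" true L),
       ("cog", c ++ pvSel "COG:COG" false L), ("kegg", k2 ++ pvSel "KEGG:" false L),
       ("uniparc", up ++ pvSel "UniParc:" true L), ("rfam", rf ++ pvSel "RFAM:" false L),
       ("so", so ++ pvSel "SO:" false L)] := by
  induction L generalizing g e u r c k2 up rf so with
  | nil => simp [pvSel]
  | cons x L ih =>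
    rw [List.foldl_cons]
    by_cases h1 : PySem.Str.startswith x "GO:" = true
    · have f2 := pvSwExcl x "GO:" "EC:" h1 (by decide)
      have f3 := pvSwExcl x "GO:" "UniRef:" h1 (by decide)
      have f4 := pvSwExcl x "GO:" "RefSeq:" h1 (by decide)
      have f5 := pvSwExcl x "GO:" "COG:COG" h1 (by decide)
      have f6 := pvSwExcl x "GO:" "KEGG:" h1 (by decide)
      have f7 := pvSwExcl x "GO:" "UniParc:" h1 (by decide)
      have f8 := pvSwExcl x "GO:" "RFAM:" h1 (by decide)
      have f9 := pvSwExcl x "GO:" "SO:" h1 (by decide)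
      rw [show pvStep (PySem.Dict.mk [("go", g), ("ec", e), ("uniref", u), ("refseq", r), ("cog", c), ("kegg", k2), ("uniparc", up), ("rfam", rf), ("so", so)]) x = PySem.Dict.mk [("go", g ++ [x]), ("ec", e), ("uniref", u), ("refseq", r), ("cog", c), ("kegg", k2), ("uniparc", up), ("rfam", rf), ("so", so)] by
          simp only [pvStep, h1]
          simp [PySem.Dict.modify, PySem.Dict.insert, PySem.Dict.getD, PySem.Dict.get?, PySem.Dict.contains]]
      rw [ih, pvSel_cons_pos _ _ _ _ h1, pvSel_cons_neg _ _ _ _ f2, pvSel_cons_neg _ _ _ _ f3, pvSel_cons_neg _ _ _ _ f4, pvSel_cons_neg _ _ _ _ f5, pvSel_cons_neg _ _ _ _ f6, pvSel_cons_neg _ _ _ _ f7, pvSel_cons_neg _ _ _ _ f8, pvSel_cons_neg _ _ _ _ f9]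
      simp
    simp only [Bool.not_eq_true] at h1
    by_cases h2 : PySem.Str.startswith x "EC:" = true
    · have f3 := pvSwExcl x "EC:" "UniRef:" h2 (by decide)
      have f4 := pvSwExcl x "EC:" "RefSeq:" h2 (by decide)
      have f5 := pvSwExcl x "EC:" "COG:COG" h2 (by decide)
      have f6 := pvSwExcl x "EC:" "KEGG:" h2 (by decide)
      have f7 := pvSwExcl x "EC:" "UniParc:" h2 (by decide)
      have f8 := pvSwExcl x "EC:" "RFAM:" h2 (by decide)
      have f9 := pvSwExcl x "EC:" "SO:" h2 (by decide)
      rw [show pvStep (PySem.Dict.mk [("go", g), ("ec", e), ("uniref", u), ("refseq", r), ("cog", c), ("kegg", k2), ("uniparc", up), ("rfam", rf), ("so", so)]) x = PySem.Dict.mk [("go", g), ("ec", e ++ [x]), ("uniref", u), ("refseq", r), ("cog", c), ("kegg", k2), ("uniparc", up), ("rfam", rf), ("so", so)] by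
          simp only [pvStep, h1, h2]
          simp [PySem.Dict.modify, PySem.Dict.insert, PySem.Dict.getD, PySem.Dict.get?, PySem.Dict.contains]]
      rw [ih, pvSel_cons_neg _ _ _ _ h1, pvSel_cons_pos _ _ _ _ h2, pvSel_cons_neg _ _ _ _ f3, pvSel_cons_neg _ _ _ _ f4, pvSel_cons_neg _ _ _ _ f5, pvSel_cons_neg _ _ _ _ f6, pvSel_cons_neg _ _ _ _ f7, pvSel_cons_neg _ _ _ _ f8, pvSel_cons_neg _ _ _ _ f9]
      simp
    simp only [Bool.not_eq_true] at h2
    by_cases h3 : PySem.Str.startswith x "UniRef:" = true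
    · have f4 := pvSwExcl x "UniRef:" "RefSeq:" h3 (by decide)
      have f5 := pvSwExcl x "UniRef:" "COG:COG" h3 (by decide)
      have f6 := pvSwExcl x "UniRef:" "KEGG:" h3 (by decide)
      have f7 := pvSwExcl x "UniRef:" "UniParc:" h3 (by decide)
      have f8 := pvSwExcl x "UniRef:" "RFAM:" h3 (by decide)
      have f9 := pvSwExcl x "UniRef:" "SO:" h3 (by decide)
      rw [show pvStep (PySem.Dict.mk [("go", g), ("ec", e), ("uniref", u), ("refseq", r), ("cog", c), ("kegg", k2), ("uniparc", up), ("rfam", rf), ("so", so)]) x = PySem.Dict.mk [("go", g), ("ec", e), ("uniref", u ++ [PySem.Str.replace x "UniRef:" ""]), ("refseq", r), ("cog", c), ("kegg", k2), ("uniparc", up), ("rfam", rf), ("so", so)] by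
          simp only [pvStep, h1, h2, h3]
          simp [PySem.Dict.modify, PySem.Dict.insert, PySem.Dict.getD, PySem.Dict.get?, PySem.Dict.contains]]
      rw [ih, pvSel_cons_neg _ _ _ _ h1, pvSel_cons_neg _ _ _ _ h2, pvSel_cons_pos _ _ _ _ h3, pvSel_cons_neg _ _ _ _ f4, pvSel_cons_neg _ _ _ _ f5, pvSel_cons_neg _ _ _ _ f6, pvSel_cons_neg _ _ _ _ f7, pvSel_cons_neg _ _ _ _ f8, pvSel_cons_neg _ _ _ _ f9]
      simp
    simp only [Bool.not_eq_true] at h3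
    by_cases h4 : PySem.Str.startswith x "RefSeq:" = true
    · have f5 := pvSwExcl x "RefSeq:" "COG:COG" h4 (by decide)
      have f6 := pvSwExcl x "RefSeq:" "KEGG:" h4 (by decide)
      have f7 := pvSwExcl x "RefSeq:" "UniParc:" h4 (by decide)
      have f8 := pvSwExcl x "RefSeq:" "RFAM:" h4 (by decide)
      have f9 := pvSwExcl x "RefSeq:" "SO:" h4 (by decide)
      rw [show pvStep (PySem.Dict.mk [("go", g), ("ec", e), ("uniref", u), ("refseq", r), ("cog", c), ("kegg", k2), ("uniparc", up), ("rfam", rf), ("so", so)]) x = PySem.Dict.mk [("go", g), ("ec", e), ("uniref", u), ("refseq", r ++ [PySem.Str.replace x "RefSeq:" ""]), ("cog", c), ("kegg", k2), ("uniparc", up), ("rfam", rf), ("so", so)] by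
          simp only [pvStep, h1, h2, h3, h4]
          simp [PySem.Dict.modify, PySem.Dict.insert, PySem.Dict.getD, PySem.Dict.get?, PySem.Dict.contains]]
      rw [ih, pvSel_cons_neg _ _ _ _ h1, pvSel_cons_neg _ _ _ _ h2, pvSel_cons_neg _ _ _ _ h3, pvSel_cons_pos _ _ _ _ h4, pvSel_cons_neg _ _ _ _ f5, pvSel_cons_neg _ _ _ _ f6, pvSel_cons_neg _ _ _ _ f7, pvSel_cons_neg _ _ _ _ f8, pvSel_cons_neg _ _ _ _ f9]
      simp
    simp only [Bool.not_eq_true] at h4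
    by_cases h5 : PySem.Str.startswith x "COG:COG" = true
    · have f6 := pvSwExcl x "COG:COG" "KEGG:" h5 (by decide)
      have f7 := pvSwExcl x "COG:COG" "UniParc:" h5 (by decide)
      have f8 := pvSwExcl x "COG:COG" "RFAM:" h5 (by decide)
      have f9 := pvSwExcl x "COG:COG" "SO:" h5 (by decide)
      rw [show pvStep (PySem.Dict.mk [("go", g), ("ec", e), ("uniref", u), ("refseq", r), ("cog", c), ("kegg", k2), ("uniparc", up), ("rfam", rf), ("so", so)]) x = PySem.Dict.mk [("go", g), ("ec", e), ("uniref", u), ("refseq", r), ("cog", c ++ [x]), ("kegg", k2), ("uniparc", up), ("rfam", rf), ("so", so)] by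
          simp only [pvStep, h1, h2, h3, h4, h5]
          simp [PySem.Dict.modify, PySem.Dict.insert, PySem.Dict.getD, PySem.Dict.get?, PySem.Dict.contains]]
      rw [ih, pvSel_cons_neg _ _ _ _ h1, pvSel_cons_neg _ _ _ _ h2, pvSel_cons_neg _ _ _ _ h3, pvSel_cons_neg _ _ _ _ h4, pvSel_cons_pos _ _ _ _ h5, pvSel_cons_neg _ _ _ _ f6, pvSel_cons_neg _ _ _ _ f7, pvSel_cons_neg _ _ _ _ f8, pvSel_cons_neg _ _ _ _ f9]
      simp
    simp only [Bool.not_eq_true] at h5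
    by_cases h6 : PySem.Str.startswith x "KEGG:" = true
    · have f7 := pvSwExcl x "KEGG:" "UniParc:" h6 (by decide)
      have f8 := pvSwExcl x "KEGG:" "RFAM:" h6 (by decide)
      have f9 := pvSwExcl x "KEGG:" "SO:" h6 (by decide)
      rw [show pvStep (PySem.Dict.mk [("go", g), ("ec", e), ("uniref", u), ("refseq", r), ("cog", c), ("kegg", k2), ("uniparc", up), ("rfam", rf), ("so", so)]) x = PySem.Dict.mk [("go", g), ("ec", e), ("uniref", u), ("refseq", r), ("cog", c), ("kegg", k2 ++ [x]), ("uniparc", up), ("rfam", rf), ("so", so)] by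
          simp only [pvStep, h1, h2, h3, h4, h5, h6]
          simp [PySem.Dict.modify, PySem.Dict.insert, PySem.Dict.getD, PySem.Dict.get?, PySem.Dict.contains]]
      rw [ih, pvSel_cons_neg _ _ _ _ h1, pvSel_cons_neg _ _ _ _ h2, pvSel_cons_neg _ _ _ _ h3, pvSel_cons_neg _ _ _ _ h4, pvSel_cons_neg _ _ _ _ h5, pvSel_cons_pos _ _ _ _ h6, pvSel_cons_neg _ _ _ _ f7, pvSel_cons_neg _ _ _ _ f8, pvSel_cons_neg _ _ _ _ f9]
      simp
    simp only [Bool.not_eq_true] at h6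
    by_cases h7 : PySem.Str.startswith x "UniParc:" = true
    · have f8 := pvSwExcl x "UniParc:" "RFAM:" h7 (by decide)
      have f9 := pvSwExcl x "UniParc:" "SO:" h7 (by decide)
      rw [show pvStep (PySem.Dict.mk [("go", g), ("ec", e), ("uniref", u), ("refseq", r), ("cog", c), ("kegg", k2), ("uniparc", up), ("rfam", rf), ("so", so)]) x = PySem.Dict.mk [("go", g), ("ec", e), ("uniref", u), ("refseq", r), ("cog", c), ("kegg", k2), ("uniparc", up ++ [PySem.Str.replace x "UniParc:" ""]), ("rfam", rf), ("so", so)] by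
          simp only [pvStep, h1, h2, h3, h4, h5, h6, h7]
          simp [PySem.Dict.modify, PySem.Dict.insert, PySem.Dict.getD, PySem.Dict.get?, PySem.Dict.contains]]
      rw [ih, pvSel_cons_neg _ _ _ _ h1, pvSel_cons_neg _ _ _ _ h2, pvSel_cons_neg _ _ _ _ h3, pvSel_cons_neg _ _ _ _ h4, pvSel_cons_neg _ _ _ _ h5, pvSel_cons_neg _ _ _ _ h6, pvSel_cons_pos _ _ _ _ h7, pvSel_cons_neg _ _ _ _ f8, pvSel_cons_neg _ _ _ _ f9]
      simp
    simp only [Bool.not_eq_true] at h7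
    by_cases h8 : PySem.Str.startswith x "RFAM:" = true
    · have f9 := pvSwExcl x "RFAM:" "SO:" h8 (by decide)
      rw [show pvStep (PySem.Dict.mk [("go", g), ("ec", e), ("uniref", u), ("refseq", r), ("cog", c), ("kegg", k2), ("uniparc", up), ("rfam", rf), ("so", so)]) x = PySem.Dict.mk [("go", g), ("ec", e), ("uniref", u), ("refseq", r), ("cog", c), ("kegg", k2), ("uniparc", up), ("rfam", rf ++ [x]), ("so", so)] by
          simp only [pvStep, h1, h2, h3, h4, h5, h6, h7, h8]
          simp [PySem.Dict.modify, PySem.Dict.insert, PySem.Dict.getD, PySem.Dict.get?, PySem.Dict.contains]]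
      rw [ih, pvSel_cons_neg _ _ _ _ h1, pvSel_cons_neg _ _ _ _ h2, pvSel_cons_neg _ _ _ _ h3, pvSel_cons_neg _ _ _ _ h4, pvSel_cons_neg _ _ _ _ h5, pvSel_cons_neg _ _ _ _ h6, pvSel_cons_neg _ _ _ _ h7, pvSel_cons_pos _ _ _ _ h8, pvSel_cons_neg _ _ _ _ f9]
      simp
    simp only [Bool.not_eq_true] at h8
    by_cases h9 : PySem.Str.startswith x "SO:" = true
    · rw [show pvStep (PySem.Dict.mk [("go", g), ("ec", e), ("uniref", u), ("refseq", r), ("cog", c), ("kegg", k2), ("uniparc", up), ("rfam", rf), ("so", so)]) x = PySem.Dict.mk [("go", g), ("ec", e), ("uniref", u), ("refseq", r), ("cog", c), ("kegg", k2), ("uniparc", up), ("rfam", rf), ("so", so ++ [x])] by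
          simp only [pvStep, h1, h2, h3, h4, h5, h6, h7, h8, h9]
          simp [PySem.Dict.modify, PySem.Dict.insert, PySem.Dict.getD, PySem.Dict.get?, PySem.Dict.contains]]
      rw [ih, pvSel_cons_neg _ _ _ _ h1, pvSel_cons_neg _ _ _ _ h2, pvSel_cons_neg _ _ _ _ h3, pvSel_cons_neg _ _ _ _ h4, pvSel_cons_neg _ _ _ _ h5, pvSel_cons_neg _ _ _ _ h6, pvSel_cons_neg _ _ _ _ h7, pvSel_cons_neg _ _ _ _ h8, pvSel_cons_pos _ _ _ _ h9]
      simp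
    simp only [Bool.not_eq_true] at h9
    rw [show pvStep (PySem.Dict.mk [("go", g), ("ec", e), ("uniref", u), ("refseq", r), ("cog", c), ("kegg", k2), ("uniparc", up), ("rfam", rf), ("so", so)]) x = PySem.Dict.mk [("go", g), ("ec", e), ("uniref", u), ("refseq", r), ("cog", c), ("kegg", k2), ("uniparc", up), ("rfam", rf), ("so", so)] by
        simp only [pvStep, h1, h2, h3, h4, h5, h6, h7, h8, h9]
        simp]
    rw [ih, pvSel_cons_neg _ _ _ _ h1, pvSel_cons_neg _ _ _ _ h2, pvSel_cons_neg _ _ _ _ h3, pvSel_cons_neg _ _ _ _ h4, pvSel_cons_neg _ _ _ _ h5, pvSel_cons_neg _ _ _ _ h6, pvSel_cons_neg _ _ _ _ h7, pvSel_cons_neg _ _ _ _ h8, pvSel_cons_neg _ _ _ _ h9]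


theorem pvInit_eq : PySem.Dict.ofList
    [("go", ([] : List String)), ("ec", []), ("uniref", []), ("refseq", []), ("cog", []),
     ("kegg", []), ("uniparc", []), ("rfam", []), ("so", [])]
  = PySem.Dict.mk [("go", []), ("ec", []), ("uniref", []), ("refseq", []), ("cog", []),
     ("kegg", []), ("uniparc", []), ("rfam", []), ("so", [])] := by decide

-- ===== VERDICT (by name: the statement is the Claim_ definition above) =====
theorem parse_dbxrefs_spec : Claim_equal_parse_dbxrefs := by
  intro s _
  unfold Spec_parse_dbxrefs
  simp only [parse_dbxrefs, parse_dbxrefs_alt]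
  by_cases hg : s = "" ∨ PySem.Str.strip s = ""
  · rw [if_pos hg, if_pos hg]
    decide
  · rw [if_neg hg, if_neg hg]
    show (List.foldl (fun d it => pvStep d (PySem.Str.strip it))
        (PySem.Dict.ofList [("go", []), ("ec", []), ("uniref", []), ("refseq", []), ("cog", []),
          ("kegg", []), ("uniparc", []), ("rfam", []), ("so", [])])
        ((PySem.Str.split? s ",").getD [])).items = _
    rw [← List.foldl_map, pvInit_eq, pvLoop]
    simp [pvTable, pvSel]
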